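-- pv_equiv track=rewrite | github.com/olanajibah-ENG/Senior-project1-ATDG- | Ai_project/core_ai/language_processors/python_processor.py | _unwrap_complex_type
-- ===== SOURCE A (Python) =====
-- def _unwrap_complex_type(type_str: str) -> str:
--     for prefix in ['List[', 'Set[', 'Tuple[', 'Optional[', 'Dict[']:
--         if type_str.startswith(prefix) and type_str.endswith(']'):
--             inner = type_str[len(prefix):-1].strip()
--             if ',' in inner:
--                 return inner.split(',')[-1].strip()
--             return inner
--     return type_str
-- ===== SOURCE B (Python) =====
-- def _unwrap_complex_type(type_str: str) -> str:
--     # Single index scan: locate the first '[' and the last ',' after it in one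
--     # pass, then emit one slice; no per-prefix startswith tests, no split().
--     n = len(type_str)
--     if n == 0 or type_str[n - 1] != ']':
--         return type_str
--     br = -1
--     comma = -1
--     for i in range(n - 1):
--         c = type_str[i]
--         if c == '[' and br < 0:
--             br = i
--         elif c == ',' and br >= 0:
--             comma = i
--     if br < 0 or type_str[:br] not in ('List', 'Set', 'Tuple', 'Optional', 'Dict'):
--         return type_str
--     start = (br if comma < 0 else comma) + 1
--     return type_str[start:n - 1].strip()
-- ===== Notes on version B (the rewrite author's own statement) =====
-- stated objective: alternative
-- what changed: Replaced A's loop of five startswith/endswith prefix tests plus strip/split(',') by a single left-to-right index scan that records the first '[' and the last ',' after it, followed by one name check and one slice+strip of the relevant segment.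
import Mathlib
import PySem

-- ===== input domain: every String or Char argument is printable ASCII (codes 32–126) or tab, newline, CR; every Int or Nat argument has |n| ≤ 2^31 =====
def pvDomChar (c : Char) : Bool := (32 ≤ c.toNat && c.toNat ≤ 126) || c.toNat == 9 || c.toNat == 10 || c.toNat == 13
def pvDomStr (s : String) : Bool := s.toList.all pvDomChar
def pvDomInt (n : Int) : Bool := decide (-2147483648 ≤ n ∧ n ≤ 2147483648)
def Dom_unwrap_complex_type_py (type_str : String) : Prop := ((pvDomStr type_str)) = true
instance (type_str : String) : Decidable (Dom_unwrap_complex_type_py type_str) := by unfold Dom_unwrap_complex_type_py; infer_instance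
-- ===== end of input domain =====

-- B replaces A's five startswith/endswith prefix tests plus strip/split(',') by a
-- single index scan (first '[', last ',' after it) followed by one slice+strip.

-- ===== PORT A =====
-- shared tail of A's matched branch: strip, then if ',' in inner return
-- inner.split(',')[-1].strip().  split? with sep "," is always 'some' of a
-- nonempty list, so the pyGetD default is never used (Python's [-1] returns).
def pvSplitLast (inner : String) : String :=
  if PySem.Str.isIn "," inner then
    PySem.Str.strip (PySem.List.pyGetD ((PySem.Str.split? inner ",").getD []) (-1) "")
  else inner

-- the prefix list A iterates over
def pvPrefixes : List String := ["List[", "Set[", "Tuple[", "Optional[", "Dict["]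

-- the for-loop over prefixes; 'return' = stop, falling off the list returns type_str
def pvUnwrapLoop (type_str : String) : List String → String
  | [] => type_str
  | p :: ps =>
    if PySem.Str.startswith type_str p && PySem.Str.endswith type_str "]" then
      pvSplitLast (PySem.Str.strip (PySem.Str.slice type_str (some (PySem.Str.len p)) (some (-1))))
    else pvUnwrapLoop type_str ps

def unwrap_complex_type_py (type_str : String) : String :=
  pvUnwrapLoop type_str pvPrefixes

-- ===== PORT B =====
-- body of B's single 'for i in range(n-1)' loop: state (br, comma)
def pvScanStep (st : Int × Int) (p : Char × Nat) : Int × Int :=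
  if p.1 = '[' ∧ st.1 < 0 then ((p.2 : Int), st.2)
  else if p.1 = ',' ∧ 0 ≤ st.1 then (st.1, (p.2 : Int))
  else st

def unwrap_complex_type_py_alt (type_str : String) : String :=
  let cs := type_str.toList
  let n := cs.length
  if cs.getLast? ≠ some ']' then type_str     -- n == 0 or type_str[n-1] != ']'
  else
    -- for i in range(n-1): record first '[' and last ',' seen after it
    let st := ((cs.take (n - 1)).zipIdx).foldl pvScanStep (-1, -1)
    if st.1 < 0 then type_str
    else if (["List", "Set", "Tuple", "Optional", "Dict"].contains
        (String.ofList (cs.take st.1.toNat))) = false then type_str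
    else
      let start := ((if st.2 < 0 then st.1 else st.2) + 1).toNat
      String.ofList (PySem.Chars.strip ((cs.drop start).take (n - 1 - start)))

-- ===== PRECONDITION & SPEC =====
def Spec_unwrap_complex_type_py (type_str : String) (out : String) : Prop := out = unwrap_complex_type_py_alt type_str
instance (type_str : String) (out : String) : Decidable (Spec_unwrap_complex_type_py type_str out) := by unfold Spec_unwrap_complex_type_py; infer_instance

-- ===== CLAIM (what is proved, stated in full; the proofs are below) =====
def Claim_equal_unwrap_complex_type_py : Prop := ∀ (type_str : String), Dom_unwrap_complex_type_py type_str → Spec_unwrap_complex_type_py type_str (unwrap_complex_type_py type_str)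

-- ===== LEMMAS AND PROOFS =====


-- dropWhile passes over a block ending in a non-matching char
theorem pv_dropWhile_append_cons (P : Char → Bool) (p q : List Char) (c : Char)
    (hc : P c = false) :
    List.dropWhile P (p ++ c :: q) = List.dropWhile P p ++ c :: q := by
  rw [List.dropWhile_append]
  split
  · next h =>
    rw [List.isEmpty_iff] at h
    rw [h, List.dropWhile_cons, hc]
    simp
  · rfl

theorem pv_lstrip_append_cons (p q : List Char) (c : Char)
    (hc : PySem.Chars.isspace c = false) :
    PySem.Chars.lstrip (p ++ c :: q) = PySem.Chars.lstrip p ++ c :: q := by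
  simp [PySem.Chars.lstrip, pv_dropWhile_append_cons _ _ _ _ hc]

theorem pv_rstrip_append_cons (p q : List Char) (c : Char)
    (hc : PySem.Chars.isspace c = false) :
    PySem.Chars.rstrip (p ++ c :: q) = p ++ c :: PySem.Chars.rstrip q := by
  simp only [PySem.Chars.rstrip, List.reverse_append, List.reverse_cons, List.append_assoc,
    List.singleton_append]
  rw [pv_dropWhile_append_cons _ _ _ _ hc]
  simp

theorem pv_rstrip_idem (q : List Char) :
    PySem.Chars.rstrip (PySem.Chars.rstrip q) = PySem.Chars.rstrip q := by
  simp [PySem.Chars.rstrip, List.dropWhile_idempotent]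

-- stripping after rstrip is stripping
theorem pv_strip_rstrip (q : List Char) :
    PySem.Chars.strip (PySem.Chars.rstrip q) = PySem.Chars.strip q := by
  have hsplit := List.takeWhile_append_dropWhile (p := PySem.Chars.isspace) (l := q)
  rcases hr : List.dropWhile PySem.Chars.isspace q with _ | ⟨c, r'⟩
  · -- q is all whitespace: rstrip q = []
    have hall : ∀ x ∈ q, PySem.Chars.isspace x = true := List.dropWhile_eq_nil_iff.1 hr
    have hq : PySem.Chars.rstrip q = [] := by
      simp only [PySem.Chars.rstrip, List.reverse_eq_nil_iff]
      rw [List.dropWhile_eq_nil_iff]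
      intro x hx; exact hall x (by simpa using hx)
    rw [hq]
    simp [PySem.Chars.strip, PySem.Chars.lstrip, PySem.Chars.rstrip, hr]
  · have hc : PySem.Chars.isspace c = false := by
      have := List.head_dropWhile_not PySem.Chars.isspace (l := q) (by rw [hr]; simp)
      simpa [hr] using this
    have hq : q = List.takeWhile PySem.Chars.isspace q ++ c :: r' := by rw [← hr, hsplit]
    have hw : PySem.Chars.lstrip (List.takeWhile PySem.Chars.isspace q) = [] := by
      rw [PySem.Chars.lstrip, List.dropWhile_eq_nil_iff]
      exact fun x hx => List.mem_takeWhile_imp hx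
    rw [hq, pv_rstrip_append_cons _ _ _ hc]
    simp only [PySem.Chars.strip, pv_lstrip_append_cons _ _ _ hc, hw, List.nil_append]
    rw [show (c :: PySem.Chars.rstrip r') = [] ++ c :: PySem.Chars.rstrip r' from rfl,
        show (c :: r') = [] ++ c :: r' from rfl,
        pv_rstrip_append_cons _ _ _ hc, pv_rstrip_append_cons _ _ _ hc, pv_rstrip_idem]

theorem pv_mem_lstrip {c : Char} {l : List Char} (h : c ∈ PySem.Chars.lstrip l) : c ∈ l :=
  (List.dropWhile_sublist _).mem h

theorem pv_mem_rstrip {c : Char} {l : List Char} (h : c ∈ PySem.Chars.rstrip l) : c ∈ l := by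
  simp only [PySem.Chars.rstrip, List.mem_reverse] at h
  exact List.mem_reverse.1 ((List.dropWhile_sublist _).mem h)

theorem pv_mem_strip {c : Char} {l : List Char} (h : c ∈ PySem.Chars.strip l) : c ∈ l :=
  pv_mem_lstrip (pv_mem_rstrip h)


theorem pv_go_no_comma (l : List Char) (cur : List Char) (acc : List (List Char))
    (fuel : Nat) (h : ',' ∉ l) (hf : l.length ≤ fuel) :
    PySem.Chars.splitOn.go [','] fuel l cur acc = ((cur.reverse ++ l) :: acc).reverse := by
  induction l generalizing cur fuel with
  | nil => cases fuel <;> simp [PySem.Chars.splitOn.go]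
  | cons c rest ih =>
    cases fuel with
    | zero => simp at hf
    | succ f =>
      have hc : c ≠ ',' := fun hcc => h (by simp [hcc])
      rw [PySem.Chars.splitOn.go]
      rw [if_neg (by simp [List.isPrefixOf, Ne.symm hc])]
      rw [ih (c :: cur) f (fun hm => h (by simp [hm])) (by simpa using hf)]
      simp

theorem pv_go_last_comma (u v : List Char) (cur : List Char) (acc : List (List Char))
    (fuel : Nat) (hv : ',' ∉ v) (hf : (u ++ ',' :: v).length + 1 ≤ fuel) :
    ∃ pre, PySem.Chars.splitOn.go [','] fuel (u ++ ',' :: v) cur acc = (v :: pre).reverse := by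
  induction u generalizing cur acc fuel with
  | nil =>
    cases fuel with
    | zero => simp at hf
    | succ f =>
      rw [List.nil_append, PySem.Chars.splitOn.go]
      rw [if_pos (by simp [List.isPrefixOf])]
      rw [pv_go_no_comma _ _ _ _ (by simpa using hv) (by simp at hf ⊢; omega)]
      exact ⟨cur.reverse :: acc, by simp⟩
  | cons c u' ih =>
    cases fuel with
    | zero => simp at hf
    | succ f =>
      by_cases hc : c = ','
      · subst hc
        rw [List.cons_append, PySem.Chars.splitOn.go]
        rw [if_pos (by simp [List.isPrefixOf])]
        simp only [List.length_cons, List.length_nil, List.drop_succ_cons, List.drop_zero]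
        exact ih [] (cur.reverse :: acc) f (by simp at hf ⊢; omega)
      · rw [List.cons_append, PySem.Chars.splitOn.go]
        rw [if_neg (by simp [List.isPrefixOf, Ne.symm hc])]
        exact ih (c :: cur) acc f (by simp at hf ⊢; omega)


theorem pv_scan_no_bracket (l : List Char) (k : Nat) (h : '[' ∉ l) :
    (l.zipIdx k).foldl pvScanStep (-1, -1) = (-1, -1) := by
  induction l generalizing k with
  | nil => rfl
  | cons c rest ih =>
    rw [List.zipIdx_cons, List.foldl_cons]
    have hc : c ≠ '[' := fun hcc => h (by simp [hcc])
    have : pvScanStep (-1, -1) (c, k) = (-1, -1) := by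
      simp [pvScanStep, hc]
    rw [this, ih (k + 1) (fun hm => h (by simp [hm]))]

theorem pv_scan_no_comma (l : List Char) (k : Nat) (br c0 : Int) (hbr : 0 ≤ br)
    (h : ',' ∉ l) :
    (l.zipIdx k).foldl pvScanStep (br, c0) = (br, c0) := by
  induction l generalizing k with
  | nil => rfl
  | cons c rest ih =>
    rw [List.zipIdx_cons, List.foldl_cons]
    have hc : c ≠ ',' := fun hcc => h (by simp [hcc])
    have : pvScanStep (br, c0) (c, k) = (br, c0) := by
      simp only [pvScanStep]
      rw [if_neg (by simp; intro _; omega), if_neg (by simp [hc])]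
    rw [this, ih (k + 1) (fun hm => h (by simp [hm]))]

theorem pv_scan_last_comma (p v : List Char) (k : Nat) (br c0 : Int) (hbr : 0 ≤ br)
    (hv : ',' ∉ v) :
    ((p ++ ',' :: v).zipIdx k).foldl pvScanStep (br, c0) = (br, (k : Int) + p.length) := by
  induction p generalizing k c0 with
  | nil =>
    rw [List.nil_append, List.zipIdx_cons, List.foldl_cons]
    have : pvScanStep (br, c0) (',', k) = (br, (k : Int)) := by
      simp only [pvScanStep]
      rw [if_neg (by simp), if_pos (by simp [hbr])]
    rw [this, pv_scan_no_comma v (k + 1) br _ hbr hv]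
    simp
  | cons c p' ih =>
    rw [List.cons_append, List.zipIdx_cons, List.foldl_cons]
    have hstep : (pvScanStep (br, c0) (c, k)).1 = br ∧
        ∃ c1, pvScanStep (br, c0) (c, k) = (br, c1) := by
      simp only [pvScanStep]
      split
      · next hcc => omega
      · split
        · exact ⟨rfl, _, rfl⟩
        · exact ⟨rfl, _, rfl⟩
    obtain ⟨-, c1, hc1⟩ := hstep
    rw [hc1, ih (k + 1) c1]
    have : ((k + 1 : Nat) : Int) + (p'.length : Int) = (k : Int) + ((c :: p').length : Int) := by
      simp only [List.length_cons]; push_cast; ring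
    rw [this]
theorem pv_scan_after_bracket (N rest : List Char) (k : Nat) (hN : '[' ∉ N) :
    ((N ++ '[' :: rest).zipIdx k).foldl pvScanStep (-1, -1) =
      (rest.zipIdx (k + N.length + 1)).foldl pvScanStep ((k : Int) + N.length, -1) := by
  induction N generalizing k with
  | nil =>
    rw [List.nil_append, List.zipIdx_cons, List.foldl_cons]
    have : pvScanStep (-1, -1) ('[', k) = ((k : Int), -1) := by
      simp [pvScanStep]
    rw [this]
    simp
  | cons c N' ih =>
    rw [List.cons_append, List.zipIdx_cons, List.foldl_cons]
    have hc : c ≠ '[' := fun hcc => hN (by simp [hcc])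
    have : pvScanStep (-1, -1) (c, k) = (-1, -1) := by
      simp [pvScanStep, hc]
    rw [this, ih (k + 1) (fun hm => hN (by simp [hm]))]
    have h1 : k + 1 + N'.length + 1 = k + (c :: N').length + 1 := by simp; omega
    have h2 : ((k + 1 : Nat) : Int) + (N'.length : Int) = (k : Int) + ((c :: N').length : Int) := by
      simp only [List.length_cons]; push_cast; ring
    rw [h1, h2]

-- its .fst is br once br ≥ 0
theorem pv_scan_fst (l : List (Char × Nat)) (br c0 : Int) (hbr : 0 ≤ br) :
    (l.foldl pvScanStep (br, c0)).1 = br := by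
  induction l generalizing c0 with
  | nil => rfl
  | cons x l ih =>
    rw [List.foldl_cons]
    have : ∃ c1, pvScanStep (br, c0) x = (br, c1) := by
      simp only [pvScanStep]
      split
      · next h => omega
      · split
        · exact ⟨_, rfl⟩
        · exact ⟨_, rfl⟩
    obtain ⟨c1, hc1⟩ := this
    rw [hc1, ih c1]


-- strings are equal when their character lists are
theorem pv_str_ext {s t : String} (h : s.toList = t.toList) : s = t := by
  have := congrArg String.ofList h
  simpa using this

-- decompose a list at the FIRST occurrence of an element
theorem pv_first_split {c : Char} {l : List Char} (h : c ∈ l) :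
    ∃ p q, l = p ++ c :: q ∧ c ∉ p := by
  induction l with
  | nil => simp at h
  | cons x t ih =>
    by_cases hx : x = c
    · exact ⟨[], t, by simp [hx], by simp⟩
    · obtain ⟨p, q, hpq, hnp⟩ := ih (by
        rcases List.mem_cons.1 h with h' | h'
        · exact absurd h'.symm hx
        · exact h')
      exact ⟨x :: p, q, by simp [hpq], by simp [hnp, Ne.symm hx]⟩

-- decompose a list at the LAST occurrence of an element
theorem pv_last_split {c : Char} {l : List Char} (h : c ∈ l) :
    ∃ p q, l = p ++ c :: q ∧ c ∉ q := by
  obtain ⟨a, b, hab, hna⟩ := pv_first_split (l := l.reverse) (by simpa using h)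
  refine ⟨b.reverse, a.reverse, ?_, by simpa using hna⟩
  have := congrArg List.reverse hab
  simpa using this

-- B's value on a matched input equals A's matched-branch value
theorem pv_alt_matched (s : String) (N : List Char) (P : String)
    (hP : P.toList = N ++ ['['])
    (hNb : '[' ∉ N)
    (hname : (["List", "Set", "Tuple", "Optional", "Dict"].contains (String.ofList N)) = true)
    (he : PySem.Str.endswith s "]" = true)
    (hsw : PySem.Str.startswith s P = true) :
    unwrap_complex_type_py_alt s =
      pvSplitLast (PySem.Str.strip (PySem.Str.slice s (some (PySem.Str.len P)) (some (-1)))) := by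
  rw [PySem.Str.endswith_eq, PySem.Chars.endswith_iff] at he
  obtain ⟨cs', hcs⟩ : ∃ u, s.toList = u ++ [']'] := by
    obtain ⟨u, hu⟩ := he
    exact ⟨u, hu.symm⟩
  rw [PySem.Str.startswith_eq, PySem.Chars.startswith_iff, hP] at hsw
  obtain ⟨t, ht⟩ := hsw
  rcases t.eq_nil_or_concat with rfl | ⟨t', x, rfl⟩
  · exfalso
    rw [List.append_nil] at ht
    have h1 := congrArg List.getLast? ht
    rw [hcs] at h1
    simp at h1
  · have ht' : ((N ++ ['[']) ++ t') ++ [x] = cs' ++ [']'] := by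
      rw [← hcs, ← ht]; simp
    have hx : x = ']' := by
      have h1 := congrArg List.getLast? ht'
      rw [List.getLast?_concat, List.getLast?_concat] at h1
      exact Option.some.inj h1
    have hcs' : cs' = N ++ '[' :: t' := by
      have := congrArg List.dropLast ht'
      simp only [List.dropLast_concat] at this
      rw [← this]; simp
    subst hx
    set rest := t' with hrest
    have hsplit2 : s.toList = (N ++ ['[']) ++ (rest ++ [']']) := by
      rw [hcs, hcs']; simp
    have hlen : s.toList.length = N.length + 1 + rest.length + 1 := by
      rw [hsplit2]; simp; omega
    have htake : s.toList.take (s.toList.length - 1) = cs' := by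
      rw [hcs]; simp
    -- the A-side slice is exactly `rest`
    have hsl : (PySem.Str.slice s (some (PySem.Str.len P)) (some (-1))).toList = rest := by
      rw [PySem.Str.toList_slice, PySem.Chars.slice_eq_listSlice]
      have hlenP : PySem.Str.len P = ((N.length + 1 : Nat) : Int) := by
        rw [PySem.Str.len_eq, hP]; simp
      rw [hlenP]
      simp only [PySem.List.slice, PySem.List.clampIdx_natCast, PySem.List.clampIdx_neg_one]
      have h1 : min (N.length + 1) s.toList.length = N.length + 1 := by omega
      rw [h1]
      rw [show List.drop (N.length + 1) s.toList = rest ++ [']'] by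
        rw [hsplit2, List.drop_left' (by simp)]]
      rw [show s.toList.length - 1 - (N.length + 1) = rest.length by omega]
      exact List.take_left
    unfold unwrap_complex_type_py_alt
    simp only []
    rw [if_neg (by simp [hcs])]
    have htakeN : s.toList.take ((N.length : Int)).toNat = N := by
      rw [hcs, hcs']
      simp [List.take_left']
    by_cases hcom : ',' ∈ rest
    · -- a comma occurs inside the brackets
      obtain ⟨p, q, hpq, hq⟩ := pv_last_split hcom
      have hst : ((s.toList.take (s.toList.length - 1)).zipIdx).foldl pvScanStep (-1, -1)
          = ((N.length : Int), ((N.length + 1 + p.length : Nat) : Int)) := by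
        rw [htake, hcs', hpq, pv_scan_after_bracket N _ 0 hNb,
          pv_scan_last_comma p q _ _ _ (by omega) hq]
        rw [Prod.mk.injEq]
        refine ⟨by simp, by push_cast; ring⟩
      rw [hst]
      rw [if_neg (by simp)]
      rw [htakeN, if_neg (by rw [hname]; simp)]
      rw [if_neg (by omega)]
      rw [show (((N.length + 1 + p.length : Nat) : Int) + 1).toNat = N.length + p.length + 2 by omega]
      have hsplit3 : s.toList = ((N ++ ['[']) ++ (p ++ [','])) ++ (q ++ [']']) := by
        rw [hsplit2, hpq]; simp
      rw [show List.drop (N.length + p.length + 2) s.toList = q ++ [']'] by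
        rw [hsplit3, List.drop_left' (by simp; omega)]]
      have hlenq : s.toList.length = N.length + p.length + q.length + 3 := by
        rw [hsplit3]; simp; omega
      rw [show s.toList.length - 1 - (N.length + p.length + 2) = q.length by omega]
      rw [List.take_left]
      -- now the A side
      have hinnerL : (PySem.Str.strip (PySem.Str.slice s (some (PySem.Str.len P)) (some (-1)))).toList
          = PySem.Chars.lstrip p ++ ',' :: PySem.Chars.rstrip q := by
        rw [PySem.Str.toList_strip, hsl, hpq]
        simp only [PySem.Chars.strip]
        rw [pv_lstrip_append_cons _ _ _ (by decide), pv_rstrip_append_cons _ _ _ (by decide)]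
      unfold pvSplitLast
      rw [if_pos ?_]
      swap
      · rw [PySem.Str.isIn_eq]
        rw [show (",").toList = [','] from rfl, hinnerL, PySem.Chars.isIn_iff_infix]
        exact ⟨PySem.Chars.lstrip p, PySem.Chars.rstrip q, by simp⟩
      · have hsplitq : PySem.Str.split?
            (PySem.Str.strip (PySem.Str.slice s (some (PySem.Str.len P)) (some (-1)))) ","
            = some (List.map String.ofList (PySem.Chars.splitOn
                (PySem.Chars.lstrip p ++ ',' :: PySem.Chars.rstrip q) [','])) := by
          simp only [PySem.Str.split?, PySem.Chars.split?]
          rw [show (",").toList = [','] from rfl, hinnerL]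
          rw [if_neg (by simp)]
          rfl
        rw [hsplitq]
        obtain ⟨pre, hgo⟩ := pv_go_last_comma (PySem.Chars.lstrip p) (PySem.Chars.rstrip q) [] []
          ((PySem.Chars.lstrip p ++ ',' :: PySem.Chars.rstrip q).length + 1)
          (fun hm => hq (pv_mem_rstrip hm)) (le_refl _)
        rw [PySem.Chars.splitOn, hgo]
        simp only [Option.getD_some]
        rw [List.map_reverse]
        rw [PySem.List.pyGetD, PySem.List.pyGet?_neg_one]
        rw [List.getLast?_reverse]
        simp only [List.head?_map, List.head?_cons, Option.map_some, Option.getD_some]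
        apply pv_str_ext
        rw [String.toList_ofList, PySem.Str.toList_strip, String.toList_ofList, pv_strip_rstrip]
    · -- no comma inside the brackets
      have hst : ((s.toList.take (s.toList.length - 1)).zipIdx).foldl pvScanStep (-1, -1)
          = ((N.length : Int), -1) := by
        rw [htake, hcs', pv_scan_after_bracket N _ 0 hNb,
          pv_scan_no_comma rest _ _ _ (by omega) hcom]
        simp
      rw [hst]
      rw [if_neg (by simp)]
      rw [htakeN, if_neg (by rw [hname]; simp)]
      rw [if_pos (by norm_num)]
      rw [show ((N.length : Int) + 1).toNat = N.length + 1 by omega]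
      rw [show List.drop (N.length + 1) s.toList = rest ++ [']'] by
        rw [hsplit2, List.drop_left' (by simp)]]
      rw [show s.toList.length - 1 - (N.length + 1) = rest.length by omega]
      rw [List.take_left]
      unfold pvSplitLast
      rw [if_neg ?_]
      swap
      · rw [PySem.Str.isIn_eq]
        rw [show (",").toList = [','] from rfl, PySem.Str.toList_strip, hsl]
        rw [Bool.not_eq_true, PySem.Chars.isIn_eq_false_iff]
        intro hinf
        exact hcom (pv_mem_strip (hinf.subset (List.mem_singleton_self ',')))
      · apply pv_str_ext
        rw [PySem.Str.toList_strip, String.toList_ofList, hsl]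

-- B returns the input unchanged when none of A's five prefixes matches
theorem pv_alt_unmatched (s : String)
    (h1 : PySem.Str.startswith s "List[" = false)
    (h2 : PySem.Str.startswith s "Set[" = false)
    (h3 : PySem.Str.startswith s "Tuple[" = false)
    (h4 : PySem.Str.startswith s "Optional[" = false)
    (h5 : PySem.Str.startswith s "Dict[" = false) :
    unwrap_complex_type_py_alt s = s := by
  unfold unwrap_complex_type_py_alt
  simp only []
  by_cases hlast : s.toList.getLast? = some ']'
  · rw [if_neg (by simp [hlast])]
    obtain ⟨cs', hcs⟩ : ∃ u, s.toList = u ++ [']'] := by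
      obtain ⟨l', hl'⟩ := List.getLast?_eq_some_iff.1 hlast
      exact ⟨l', hl'⟩
    have htake : s.toList.take (s.toList.length - 1) = cs' := by
      rw [hcs]; simp
    by_cases hbr : '[' ∈ cs'
    · obtain ⟨N, restl, hsplit, hNb⟩ := pv_first_split hbr
      have hfold : ((s.toList.take (s.toList.length - 1)).zipIdx.foldl pvScanStep (-1, -1)).1
          = (N.length : Int) := by
        rw [htake, hsplit, pv_scan_after_bracket N restl 0 hNb, pv_scan_fst _ _ _ (by positivity)]
        simp
      rw [hfold]
      rw [if_neg (by simp)]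
      have htakeN : s.toList.take ((N.length : Int)).toNat = N := by
        rw [hcs, hsplit]
        simp [List.take_left']
      rw [htakeN]
      have hpref : ∀ P : String, P.toList = N ++ ['['] → PySem.Str.startswith s P = true := by
        intro P hP
        rw [PySem.Str.startswith_eq, PySem.Chars.startswith_iff, hP]
        exact ⟨restl ++ [']'], by rw [hcs, hsplit]; simp⟩
      rw [if_pos ?_]
      rw [Bool.eq_false_iff]
      intro hc
      have hc' : String.ofList N ∈ ["List", "Set", "Tuple", "Optional", "Dict"] :=
        List.contains_iff_mem.mp hc
      have hN : ∀ t : String, String.ofList N = t → N = t.toList := by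
        intro t ht
        have := congrArg String.toList ht
        simpa using this
      simp only [List.mem_cons, List.not_mem_nil, or_false] at hc'
      rcases hc' with h | h | h | h | h
      · exact absurd (hpref "List[" (by rw [hN _ h]; rfl)) (ne_true_of_eq_false h1)
      · exact absurd (hpref "Set[" (by rw [hN _ h]; rfl)) (ne_true_of_eq_false h2)
      · exact absurd (hpref "Tuple[" (by rw [hN _ h]; rfl)) (ne_true_of_eq_false h3)
      · exact absurd (hpref "Optional[" (by rw [hN _ h]; rfl)) (ne_true_of_eq_false h4)
      · exact absurd (hpref "Dict[" (by rw [hN _ h]; rfl)) (ne_true_of_eq_false h5)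
    · rw [htake, pv_scan_no_bracket cs' 0 hbr]
      simp
  · rw [if_pos (by simp [hlast])]

theorem unwrap_equal (s : String) : unwrap_complex_type_py s = unwrap_complex_type_py_alt s := by
  by_cases he : PySem.Str.endswith s "]" = true
  · by_cases h1 : PySem.Str.startswith s "List[" = true
    · rw [pv_alt_matched s "List".toList "List[" rfl (by decide) (by decide) he h1]
      simp only [unwrap_complex_type_py, pvPrefixes, pvUnwrapLoop]
      rw [h1, he]; simp
    · rw [Bool.not_eq_true] at h1
      by_cases h2 : PySem.Str.startswith s "Set[" = true
      · rw [pv_alt_matched s "Set".toList "Set[" rfl (by decide) (by decide) he h2]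
        simp only [unwrap_complex_type_py, pvPrefixes, pvUnwrapLoop]
        rw [h1, h2, he]; simp
      · rw [Bool.not_eq_true] at h2
        by_cases h3 : PySem.Str.startswith s "Tuple[" = true
        · rw [pv_alt_matched s "Tuple".toList "Tuple[" rfl (by decide) (by decide) he h3]
          simp only [unwrap_complex_type_py, pvPrefixes, pvUnwrapLoop]
          rw [h1, h2, h3, he]; simp
        · rw [Bool.not_eq_true] at h3
          by_cases h4 : PySem.Str.startswith s "Optional[" = true
          · rw [pv_alt_matched s "Optional".toList "Optional[" rfl (by decide) (by decide) he h4]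
            simp only [unwrap_complex_type_py, pvPrefixes, pvUnwrapLoop]
            rw [h1, h2, h3, h4, he]; simp
          · rw [Bool.not_eq_true] at h4
            by_cases h5 : PySem.Str.startswith s "Dict[" = true
            · rw [pv_alt_matched s "Dict".toList "Dict[" rfl (by decide) (by decide) he h5]
              simp only [unwrap_complex_type_py, pvPrefixes, pvUnwrapLoop]
              rw [h1, h2, h3, h4, h5, he]; simp
            · rw [Bool.not_eq_true] at h5
              rw [pv_alt_unmatched s h1 h2 h3 h4 h5]
              simp only [unwrap_complex_type_py, pvPrefixes, pvUnwrapLoop]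
              rw [h1, h2, h3, h4, h5]; simp
  · rw [Bool.not_eq_true] at he
    have hA : unwrap_complex_type_py s = s := by
      simp only [unwrap_complex_type_py, pvPrefixes, pvUnwrapLoop]
      rw [he]; simp
    have hB : unwrap_complex_type_py_alt s = s := by
      unfold unwrap_complex_type_py_alt
      rw [if_pos ?_]
      intro hlast
      obtain ⟨l', hl'⟩ := List.getLast?_eq_some_iff.1 hlast
      have : PySem.Str.endswith s "]" = true := by
        rw [PySem.Str.endswith_eq, PySem.Chars.endswith_iff]
        exact ⟨l', by rw [hl']; rfl⟩
      rw [he] at this; exact absurd this (by simp)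
    rw [hA, hB]

-- ===== VERDICT (by name: the statement is the Claim_ definition above) =====
theorem unwrap_complex_type_py_spec : Claim_equal_unwrap_complex_type_py := by
  intro s _
  unfold Spec_unwrap_complex_type_py
  exact (unwrap_equal s).symm ▸ rfl
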